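-- pv_equiv track=rewrite | github.com/mat4rte/Laboratorios-de-Algoritmia-II | Treino 1/apelidos.py | apelidos
-- ===== SOURCE A (Python) =====
-- def apelidos(nomes):
--     lista = {}
--     for pessoa in nomes:
--         if len(pessoa.split()) in lista:
--             lista[len(pessoa.split())].append(pessoa)
--         else:
--             lista[len(pessoa.split())] = [pessoa]
--
--     for tamanho in lista:
--         lista[tamanho].sort()
--     return [ pessoa for tam in lista for pessoa in lista[tam]]
-- ===== SOURCE B (Python) =====
-- def apelidos(nomes):
--     tamanhos = list(dict.fromkeys(len(p.split()) for p in nomes))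
--     return [p for t in tamanhos
--               for p in sorted(n for n in nomes if len(n.split()) == t)]
-- ===== Notes on version B (the rewrite author's own statement) =====
-- stated objective: simpler
-- what changed: Replaces the mutable dict-of-lists bucketing (append per element, then in-place sort of each bucket) by computing the first-seen word-count order with dict.fromkeys and emitting, for each count, one sorted filter of the input; no dict of lists and no mutation.
import Mathlib
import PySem

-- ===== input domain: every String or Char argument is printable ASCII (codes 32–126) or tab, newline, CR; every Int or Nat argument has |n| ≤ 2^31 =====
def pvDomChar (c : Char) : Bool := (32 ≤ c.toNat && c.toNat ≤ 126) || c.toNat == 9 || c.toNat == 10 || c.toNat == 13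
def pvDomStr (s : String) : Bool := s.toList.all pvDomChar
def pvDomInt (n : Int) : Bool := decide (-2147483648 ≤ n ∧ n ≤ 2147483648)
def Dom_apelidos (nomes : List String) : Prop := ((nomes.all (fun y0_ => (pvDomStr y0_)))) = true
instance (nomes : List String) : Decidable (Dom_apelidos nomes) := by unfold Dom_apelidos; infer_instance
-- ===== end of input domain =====

-- B replaces A's mutable dict-of-lists bucketing by dedup of the word counts plus one sorted filter
-- per distinct count (objective: simpler; same return value).

-- len(p.split()) as an Int (shared arithmetic helper of both programs)
def pvWc (s : String) : Int := ((PySem.Str.split₀ s).length : Int)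

-- ===== PORT A =====
def apelidos (nomes : List String) : List String :=
  let lista : PySem.Dict Int (List String) :=
    nomes.foldl (fun lista pessoa =>
      if lista.contains (pvWc pessoa) then
        lista.modify (pvWc pessoa) [] (fun l => l ++ [pessoa])
      else
        lista.insert (pvWc pessoa) [pessoa]) PySem.Dict.empty
  let lista2 := lista.keys.foldl
    (fun d tamanho => d.insert tamanho (PySem.List.sorted (d.getD tamanho []) (fun p => p) false)) lista
  lista2.keys.flatMap (fun tam => lista2.getD tam [])

-- ===== PORT B =====
def apelidos_alt (nomes : List String) : List String :=
  let tamanhos := PySem.List.dedup (nomes.map (fun p => pvWc p))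
  tamanhos.flatMap (fun t =>
    PySem.List.sorted (nomes.filter (fun n => pvWc n == t)) (fun p => p) false)

-- ===== PRECONDITION & SPEC =====
def Spec_apelidos (nomes : List String) (out : List String) : Prop := out = apelidos_alt nomes
instance (nomes : List String) (out : List String) : Decidable (Spec_apelidos nomes out) := by unfold Spec_apelidos; infer_instance

-- ===== CLAIM (what is proved, stated in full; the proofs are below) =====
def Claim_equal_apelidos : Prop := ∀ (nomes : List String), Dom_apelidos nomes → Spec_apelidos nomes (apelidos nomes)

-- ===== LEMMAS AND PROOFS =====

-- canonical items of A's dict after bucketing the prefix xs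
def canonItems (xs : List String) : List (Int × List String) :=
  (PySem.List.dedup (xs.map pvWc)).map (fun t => (t, xs.filter (fun n => pvWc n == t)))

lemma find_canon (ts : List Int) (g : Int → List String) (a : Int) (h : a ∈ ts) :
    List.find? (fun p => p.1 == a) (ts.map (fun t => (t, g t))) = some (a, g a) := by
  induction ts with
  | nil => cases h
  | cons t ts ih =>
    by_cases ht : t = a
    · subst ht; simp
    · simp only [List.mem_cons] at h
      simp [ht, ih (h.resolve_left (fun he => ht he.symm))]

lemma getD_canon (ts : List Int) (g : Int → List String) (a : Int) (h : a ∈ ts) (dflt : List String) :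
    (PySem.Dict.mk (ts.map (fun t => (t, g t)))).getD a dflt = g a := by
  simp [PySem.Dict.getD, PySem.Dict.get?, find_canon ts g a h]

lemma contains_canon (ts : List Int) (g : Int → List String) (a : Int) :
    (PySem.Dict.mk (ts.map (fun t => (t, g t)))).contains a = decide (a ∈ ts) := by
  induction ts with
  | nil => simp [PySem.Dict.contains]
  | cons t ts ih =>
    simp only [PySem.Dict.contains, List.map_cons, List.any_cons] at ih ⊢
    by_cases ht : t = a
    · subst ht; simp
    · have h1 : (t == a) = false := by simp [ht]
      simp [ih, h1, show ¬ a = t from fun he => ht he.symm]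

lemma insert_canon (ts : List Int) (g : Int → List String) (a : Int) (v : List String) (h : a ∈ ts) :
    (PySem.Dict.mk (ts.map (fun t => (t, g t)))).insert a v
      = PySem.Dict.mk (ts.map (fun t => (t, if t = a then v else g t))) := by
  simp only [PySem.Dict.insert, contains_canon, h, decide_true, if_true, List.map_map]
  congr 1
  apply List.map_congr_left
  intro t _
  by_cases ht : t = a
  · subst ht; simp
  · simp [ht]

lemma insert_canon_new (ts : List Int) (g : Int → List String) (a : Int) (v : List String) (h : a ∉ ts) :
    (PySem.Dict.mk (ts.map (fun t => (t, g t)))).insert a v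
      = PySem.Dict.mk (ts.map (fun t => (t, g t)) ++ [(a, v)]) := by
  simp [PySem.Dict.insert, h]

lemma dedup_append_singleton {α : Type} [BEq α] [LawfulBEq α] (l : List α) (a : α) :
    PySem.List.dedup (l ++ [a])
      = if a ∈ l then PySem.List.dedup l else PySem.List.dedup l ++ [a] := by
  have h1 : PySem.List.dedup (l ++ [a]) = PySem.Set.add (PySem.List.dedup l) a := by
    simp only [PySem.List.dedup, PySem.Set.ofList_eq_foldl, List.foldl_append, List.foldl]
  rw [h1, PySem.Set.add]
  by_cases h : a ∈ l
  · simp [PySem.Set.contains, h]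
  · simp [PySem.Set.contains, h]

-- one step of A's bucketing loop preserves the canonical form
lemma phase1_step (pref : List String) (x : String) :
    (if (PySem.Dict.mk (canonItems pref)).contains (pvWc x) then
        (PySem.Dict.mk (canonItems pref)).modify (pvWc x) [] (fun l => l ++ [x])
      else (PySem.Dict.mk (canonItems pref)).insert (pvWc x) [x])
      = PySem.Dict.mk (canonItems (pref ++ [x])) := by
  have hmem : pvWc x ∈ PySem.List.dedup (pref.map pvWc) ↔ pvWc x ∈ pref.map pvWc :=
    PySem.List.mem_dedup _ _
  unfold canonItems
  rw [contains_canon]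
  have hded : PySem.List.dedup ((pref ++ [x]).map pvWc)
      = if pvWc x ∈ pref.map pvWc then PySem.List.dedup (pref.map pvWc)
        else PySem.List.dedup (pref.map pvWc) ++ [pvWc x] := by
    rw [List.map_append, List.map_singleton, dedup_append_singleton]
  by_cases h : pvWc x ∈ pref.map pvWc
  · have h' : pvWc x ∈ PySem.List.dedup (pref.map pvWc) := hmem.mpr h
    rw [if_pos (by simpa using h')]
    rw [PySem.Dict.modify, getD_canon _ _ _ h', insert_canon _ _ _ _ h', hded, if_pos h]
    congr 1
    apply List.map_congr_left
    intro t _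
    by_cases ht : t = pvWc x
    · subst ht
      simp [List.filter_append]
    · have ht' : ¬ pvWc x = t := fun he => ht he.symm
      simp [List.filter_append, ht, ht']
  · have h' : pvWc x ∉ PySem.List.dedup (pref.map pvWc) := fun hm => h (hmem.mp hm)
    rw [if_neg (by simpa using h')]
    rw [insert_canon_new _ _ _ _ h', hded, if_neg h, List.map_append]
    have h1 : (PySem.List.dedup (pref.map pvWc)).map
          (fun t => (t, pref.filter (fun n => pvWc n == t)))
        = (PySem.List.dedup (pref.map pvWc)).map
          (fun t => (t, (pref ++ [x]).filter (fun n => pvWc n == t))) := by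
      apply List.map_congr_left
      intro t htm
      have htx : ¬ pvWc x = t := fun he => h' (he ▸ htm)
      simp [List.filter_append, htx]
    have hf : pref.filter (fun n => pvWc n == pvWc x) = [] := by
      apply List.filter_eq_nil_iff.mpr
      intro n hn
      simp only [beq_iff_eq]
      intro he
      exact h (he ▸ List.mem_map_of_mem hn)
    have h2 : [(pvWc x, [x])]
        = [pvWc x].map (fun t => (t, (pref ++ [x]).filter (fun n => pvWc n == t))) := by
      simp [List.filter_append, hf]
    rw [h1, h2]

lemma phase1 (rest pref : List String) :
    rest.foldl (fun lista pessoa =>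
        if lista.contains (pvWc pessoa) then
          lista.modify (pvWc pessoa) [] (fun l => l ++ [pessoa])
        else lista.insert (pvWc pessoa) [pessoa]) (PySem.Dict.mk (canonItems pref))
      = PySem.Dict.mk (canonItems (pref ++ rest)) := by
  induction rest generalizing pref with
  | nil => simp
  | cons x rest ih =>
    simp only [List.foldl_cons]
    rw [phase1_step pref x, ih (pref ++ [x]), List.append_assoc]
    rfl

-- A's value-sorting loop over the keys, on a dict in canonical shape
lemma phase2 (l : List Int) (hl : l.Nodup) :
    ∀ (ts : List Int) (g : Int → List String), (∀ a ∈ l, a ∈ ts) →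
    l.foldl (fun d tamanho =>
        d.insert tamanho (PySem.List.sorted (d.getD tamanho []) (fun p => p) false))
      (PySem.Dict.mk (ts.map (fun t => (t, g t))))
      = PySem.Dict.mk (ts.map (fun t =>
          (t, if t ∈ l then PySem.List.sorted (g t) (fun p => p) false else g t))) := by
  induction l with
  | nil => intro ts g _; simp
  | cons a l ih =>
    intro ts g hsub
    have ha : a ∈ ts := hsub a (List.mem_cons_self)
    have hna : a ∉ l := (List.nodup_cons.mp hl).1
    simp only [List.foldl_cons]
    rw [getD_canon _ _ _ ha, insert_canon _ _ _ _ ha,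
      ih (List.nodup_cons.mp hl).2 ts _ (fun b hb => hsub b (List.mem_cons_of_mem a hb))]
    congr 1
    apply List.map_congr_left
    intro t _
    by_cases ht : t = a
    · subst ht; simp [hna]
    · simp [ht]

lemma flatMap_congr_mem {α β : Type} (l : List α) (f g : α → List β)
    (h : ∀ x ∈ l, f x = g x) : l.flatMap f = l.flatMap g := by
  induction l with
  | nil => rfl
  | cons x l ih =>
    simp only [List.flatMap_cons]
    rw [h x (List.mem_cons_self), ih (fun y hy => h y (List.mem_cons_of_mem x hy))]

-- ===== VERDICT (by name: the statement is the Claim_ definition above) =====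
theorem apelidos_spec : Claim_equal_apelidos := by
  intro nomes _
  show apelidos nomes = apelidos_alt nomes
  unfold apelidos apelidos_alt
  have h0 : (PySem.Dict.empty : PySem.Dict Int (List String)) = PySem.Dict.mk (canonItems []) := by
    simp [PySem.Dict.empty, canonItems, PySem.List.dedup, PySem.Set.ofList]
  rw [h0, phase1 nomes []]
  simp only [List.nil_append]
  set ts := PySem.List.dedup (nomes.map pvWc) with hts
  have hkeys : (PySem.Dict.mk (canonItems nomes)).keys = ts := by
    simp [PySem.Dict.keys, canonItems, hts, Function.comp_def]
  have hnd : ts.Nodup := by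
    simp [hts, PySem.List.dedup, PySem.Set.nodup_ofList]
  rw [hkeys]
  rw [show canonItems nomes
      = ts.map (fun t => (t, nomes.filter (fun n => pvWc n == t))) from rfl]
  rw [phase2 ts hnd ts _ (fun a ha => ha)]
  have hkeys2 : (PySem.Dict.mk (ts.map (fun t =>
      (t, if t ∈ ts then PySem.List.sorted (nomes.filter (fun n => pvWc n == t)) (fun p => p) false
          else nomes.filter (fun n => pvWc n == t))))).keys = ts := by
    simp [PySem.Dict.keys, Function.comp_def]
  rw [hkeys2]
  apply flatMap_congr_mem
  intro t htm
  rw [getD_canon _ _ _ htm]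
  simp [htm]
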